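-- pv_equiv track=rewrite | github.com/tcoratger/Plonky3 | whir/scripts/whir_optimizer.py | compute_schedule
-- ===== SOURCE A (Python) =====
-- MAX_VARS_DIRECT = 6
--
-- def compute_schedule(num_variables: int, fold_schedule: list):
--     """Expand a fold schedule into the full list of per-round folding factors.
--
--     # Overview
--
--     The user provides a (possibly short) list of folding factors.
--     If the polynomial has more variables than the schedule covers,
--     the last entry is repeated until the remaining variables drop
--     to the direct-send threshold.
--
--     # Example
--
--     ```
--     num_variables = 26, fold_schedule = [7, 4]
--       Round 0: fold 7 → 19 remaining
--       Round 1: fold 4 → 15 remaining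
--       Round 2: fold 4 → 11 remaining  (repeating last entry)
--       Round 3: fold 4 →  7 remaining
--       Round 4: fold 4 →  3 remaining  (below threshold, stop)
--       → schedule = [7, 4, 4, 4, 4], final_vars = 3
--     ```
--
--     # Returns
--
--     Tuple of (num_stir_rounds, final_sumcheck_vars, expanded_schedule).
--     """
--     remaining = num_variables
--     schedule = []
--     # Repeat the last entry for any rounds beyond the explicit schedule.
--     last_k = fold_schedule[-1]
--     # First, consume the explicit entries.
--     for k in fold_schedule:
--         schedule.append(k)
--         remaining -= k
--         # Stop as soon as the polynomial is small enough to send directly.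
--         if remaining <= MAX_VARS_DIRECT:
--             break
--     # Extend with the last factor if more folding is needed.
--     while remaining > MAX_VARS_DIRECT:
--         schedule.append(last_k)
--         remaining -= last_k
--     final_vars = max(0, remaining)
--     # The first fold happens at commitment time, not during STIR rounds.
--     # So the number of STIR rounds is one less than the number of folds.
--     num_stir = max(0, len(schedule) - 1)
--     return num_stir, final_vars, schedule
-- ===== SOURCE B (Python) =====
-- MAX_VARS_DIRECT = 6
--
-- def compute_schedule(num_variables, fold_schedule):
--     last_k = fold_schedule[-1]
--     # Scan prefix remainders to find how many explicit entries are consumed.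
--     cut = len(fold_schedule)
--     remaining = num_variables
--     for i in range(len(fold_schedule)):
--         remaining -= fold_schedule[i]
--         if remaining <= MAX_VARS_DIRECT:
--             cut = i + 1
--             break
--     schedule = fold_schedule[:cut]
--     if remaining > MAX_VARS_DIRECT:
--         # Closed-form repeat count: ceil((remaining - MAX_VARS_DIRECT) / last_k)
--         n = (remaining - MAX_VARS_DIRECT + last_k - 1) // last_k
--         schedule = schedule + [last_k] * n
--         remaining -= n * last_k
--     return max(0, len(schedule) - 1), max(0, remaining), schedule
-- ===== Notes on version B (the rewrite author's own statement) =====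
-- stated objective: alternative
-- what changed: The while loop that repeats the last fold factor one round at a time is replaced by a closed-form ceil-division repeat count with a single list-replicate extension, and the explicit-entry phase scans prefix remainders by index and slices instead of appending entry by entry.
import Mathlib
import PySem

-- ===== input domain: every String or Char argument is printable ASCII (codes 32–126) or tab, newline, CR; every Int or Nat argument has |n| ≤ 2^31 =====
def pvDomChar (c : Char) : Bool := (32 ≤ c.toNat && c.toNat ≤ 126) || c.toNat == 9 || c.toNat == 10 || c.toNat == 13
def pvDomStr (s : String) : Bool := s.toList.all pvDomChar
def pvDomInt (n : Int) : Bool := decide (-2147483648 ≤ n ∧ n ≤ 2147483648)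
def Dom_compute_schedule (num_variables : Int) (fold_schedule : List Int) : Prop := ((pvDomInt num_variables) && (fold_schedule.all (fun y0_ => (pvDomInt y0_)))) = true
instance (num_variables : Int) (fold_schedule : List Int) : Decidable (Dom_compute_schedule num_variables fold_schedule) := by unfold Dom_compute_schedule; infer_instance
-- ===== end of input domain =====

-- B replaces A's round-by-round while loop by a closed-form ceil-division repeat count, and scans/slices the explicit entries instead of appending (objective: alternative).
-- ===== PORT A =====
-- for k in fold_schedule: append, subtract, break when remaining <= 6
def pvForA (remaining : Int) (schedule : List Int) : List Int → Int × List Int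
  | [] => (remaining, schedule)
  | k :: ks =>
    let schedule' := schedule ++ [k]
    let remaining' := remaining - k
    if remaining' ≤ 6 then (remaining', schedule')
    else pvForA remaining' schedule' ks

-- while remaining > 6: append last_k, subtract.  The 0 < last_k guard only
-- makes the recursion total; where it fails Python A diverges (outside Pre_).
def pvWhileA (last_k remaining : Int) (schedule : List Int) : Int × List Int :=
  if 6 < remaining then
    if 0 < last_k then
      pvWhileA last_k (remaining - last_k) (schedule ++ [last_k])
    else (remaining, schedule)
  else (remaining, schedule)
termination_by (remaining - 6).toNat
decreasing_by omega

def compute_schedule (num_variables : Int) (fold_schedule : List Int) : Int × Int × List Int :=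
  match PySem.List.pyGet? fold_schedule (-1) with
  | none => (0, 0, [])   -- fold_schedule[-1] raises IndexError (excluded by Pre_)
  | some last_k =>
    let p := pvForA num_variables [] fold_schedule
    let q := pvWhileA last_k p.1 p.2
    (max 0 ((q.2.length : Int) - 1), max 0 q.1, q.2)

-- ===== PORT B =====
-- index scan over range(len): returns (cut, remaining)
def pvScanB (fold_schedule : List Int) (remaining : Int) (i : Nat) : Nat × Int :=
  if h : i < fold_schedule.length then
    let remaining' := remaining - fold_schedule[i]
    if remaining' ≤ 6 then (i + 1, remaining')
    else pvScanB fold_schedule remaining' (i + 1)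
  else (fold_schedule.length, remaining)
termination_by fold_schedule.length - i

def compute_schedule_alt (num_variables : Int) (fold_schedule : List Int) : Int × Int × List Int :=
  match PySem.List.pyGet? fold_schedule (-1) with
  | none => (0, 0, [])   -- fold_schedule[-1] raises IndexError (excluded by Pre_)
  | some last_k =>
    let p := pvScanB fold_schedule num_variables 0
    let schedule := fold_schedule.take p.1
    if 6 < p.2 then
      let n := PySem.Int.floordiv (p.2 - 6 + last_k - 1) last_k
      let schedule' := schedule ++ List.replicate n.toNat last_k
      (max 0 ((schedule'.length : Int) - 1), max 0 (p.2 - n * last_k), schedule')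
    else
      (max 0 ((schedule.length : Int) - 1), max 0 p.2, schedule)

-- ===== PRECONDITION & SPEC =====
-- Pre_ excludes the empty schedule, where A raises IndexError on fold_schedule[-1],
-- and the inputs where A's while loop never terminates (no explicit entry brings the
-- remaining count to the threshold and the repeated last factor is not positive).
def Pre_compute_schedule (num_variables : Int) (fold_schedule : List Int) : Prop :=
  fold_schedule ≠ [] ∧
    (0 < fold_schedule.getLastD 0 ∨
      ∃ i < fold_schedule.length, num_variables - (fold_schedule.take (i + 1)).sum ≤ 6)
instance (num_variables : Int) (fold_schedule : List Int) : Decidable (Pre_compute_schedule num_variables fold_schedule) := by unfold Pre_compute_schedule; infer_instance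

def pvWitness_compute_schedule : Int × List Int := (26, [7, 4])

def Spec_compute_schedule (num_variables : Int) (fold_schedule : List Int) (out : Int × Int × List Int) : Prop := out = compute_schedule_alt num_variables fold_schedule
instance (num_variables : Int) (fold_schedule : List Int) (out : Int × Int × List Int) : Decidable (Spec_compute_schedule num_variables fold_schedule out) := by unfold Spec_compute_schedule; infer_instance

-- ===== CLAIM (what is proved, stated in full; the proofs are below) =====
def Claim_equal_compute_schedule : Prop := ∀ (num_variables : Int) (fold_schedule : List Int), Dom_compute_schedule num_variables fold_schedule → Pre_compute_schedule num_variables fold_schedule → Spec_compute_schedule num_variables fold_schedule (compute_schedule num_variables fold_schedule)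

-- ===== LEMMAS AND PROOFS =====

-- proof-side common description of the explicit-entry phase: consumed entries and remaining
def pvLoopSpec : List Int → Int → List Int × Int
  | [], r => ([], r)
  | k :: ks, r =>
    if r - k ≤ 6 then ([k], r - k)
    else
      let p := pvLoopSpec ks (r - k)
      (k :: p.1, p.2)

theorem pvForA_eq (ks : List Int) : ∀ (r : Int) (s : List Int),
    pvForA r s ks = ((pvLoopSpec ks r).2, s ++ (pvLoopSpec ks r).1) := by
  induction ks with
  | nil => intro r s; simp [pvForA, pvLoopSpec]
  | cons k ks ih =>
    intro r s
    simp only [pvForA, pvLoopSpec]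
    split
    · simp
    · simp [ih]

theorem pvScanB_eq_aux (fs : List Int) : ∀ (n i : Nat) (r : Int), fs.length - i ≤ n → i ≤ fs.length →
    pvScanB fs r i = (i + (pvLoopSpec (fs.drop i) r).1.length, (pvLoopSpec (fs.drop i) r).2) := by
  intro n
  induction n with
  | zero =>
    intro i r hn hi
    have : i = fs.length := by omega
    subst this
    rw [pvScanB]
    simp [pvLoopSpec]
  | succ n ih =>
    intro i r hn hi
    rw [pvScanB]
    by_cases h : i < fs.length
    · have hdrop : fs.drop i = fs[i] :: fs.drop (i + 1) := by
        rw [List.drop_eq_getElem_cons h]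
      simp only [h, dif_pos, hdrop, pvLoopSpec]
      by_cases h6 : r - fs[i] ≤ 6
      · simp [h6]
      · simp only [h6, if_false]
        rw [ih (i + 1) _ (by omega) (by omega)]
        simp
        omega
    · have : i = fs.length := by omega
      subst this
      simp [pvLoopSpec]

theorem pvScanB_eq (fs : List Int) (i : Nat) (r : Int) (hi : i ≤ fs.length) :
    pvScanB fs r i = (i + (pvLoopSpec (fs.drop i) r).1.length, (pvLoopSpec (fs.drop i) r).2) :=
  pvScanB_eq_aux fs fs.length i r (by omega) hi

theorem pvLoopSpec_take (ks : List Int) : ∀ r,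
    ks.take (pvLoopSpec ks r).1.length = (pvLoopSpec ks r).1 := by
  induction ks with
  | nil => intro r; simp [pvLoopSpec]
  | cons k ks ih =>
    intro r
    simp only [pvLoopSpec]
    split
    · simp
    · simp [List.take_succ_cons, ih]

-- if some explicit prefix brings remaining to ≤ 6, the loop ends with remaining ≤ 6
theorem pvLoopSpec_le (ks : List Int) : ∀ r : Int,
    (∃ i < ks.length, r - (ks.take (i + 1)).sum ≤ 6) → (pvLoopSpec ks r).2 ≤ 6 := by
  induction ks with
  | nil => intro r h; simp at h
  | cons k ks ih =>
    intro r ⟨i, hi, hsum⟩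
    simp only [pvLoopSpec]
    by_cases h6 : r - k ≤ 6
    · simp [h6]
    · simp only [h6, if_false]
      apply ih
      cases i with
      | zero => simp at hsum; omega
      | succ j =>
        refine ⟨j, by simpa using hi, ?_⟩
        simp [List.take_succ_cons, List.sum_cons] at hsum ⊢
        omega

-- closed-form repeat count of the while loop
def pvN (r k : Int) : Int :=
  if 6 < r then PySem.Int.floordiv (r - 6 + k - 1) k else 0

theorem pvN_nonneg (r k : Int) (hk : 0 < k) : 0 ≤ pvN r k := by
  unfold pvN
  split
  · rw [PySem.Int.le_floordiv_iff_mul_le hk]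
    omega
  · omega

theorem pvN_step (r k : Int) (hk : 0 < k) (hr : 6 < r) : pvN r k = pvN (r - k) k + 1 := by
  unfold pvN
  by_cases h : 6 < r - k
  · simp only [hr, if_pos, h]
    rw [PySem.Int.floordiv_eq_ediv_of_pos hk, PySem.Int.floordiv_eq_ediv_of_pos hk]
    have : r - 6 + k - 1 = (r - k - 6 + k - 1) + 1 * k := by ring
    rw [this, Int.add_mul_ediv_right _ _ (by omega : k ≠ 0)]
  · simp only [hr, if_pos, h, if_false]
    rw [PySem.Int.floordiv_eq_iff_of_pos hk]
    constructor <;> omega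

theorem pvWhileA_eq (k : Int) (hk : 0 < k) : ∀ (m : Nat) (r : Int) (s : List Int),
    (r - 6).toNat ≤ m →
    pvWhileA k r s = (r - pvN r k * k, s ++ List.replicate (pvN r k).toNat k) := by
  intro m
  induction m with
  | zero =>
    intro r s hm
    have hr : ¬ 6 < r := by omega
    rw [pvWhileA]
    simp [hr, pvN]
  | succ m ih =>
    intro r s hm
    rw [pvWhileA]
    by_cases hr : 6 < r
    · simp only [hr, if_pos, hk]
      rw [ih (r - k) (s ++ [k]) (by omega)]
      have hstep := pvN_step r k hk hr
      have hnn := pvN_nonneg (r - k) k hk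
      simp only [Prod.mk.injEq]
      refine ⟨by rw [hstep]; ring, ?_⟩
      rw [hstep]
      have : (pvN (r - k) k + 1).toNat = (pvN (r - k) k).toNat + 1 := by omega
      rw [this, List.replicate_succ]
      simp
    · simp [hr, pvN]

theorem pyGet_last (fs : List Int) (h : fs ≠ []) :
    PySem.List.pyGet? fs (-1) = some (fs.getLastD 0) := by
  have hl : 0 < fs.length := List.length_pos_iff.mpr h
  simp [PySem.List.pyGet?, PySem.List.pyIdx?]
  rw [if_pos (by omega : 1 ≤ fs.length)]
  have hb : (some (fs.length - 1)).bind (fun a => fs[a]?) = fs[fs.length - 1]? := rfl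
  rw [hb, List.getElem?_eq_getElem (by omega)]
  rw [List.getLast?_eq_getElem?, List.getElem?_eq_getElem (by omega)]
  simp

-- ===== VERDICT (by name: the statement is the Claim_ definition above) =====
theorem compute_schedule_spec : Claim_equal_compute_schedule := by
  intro nv fs _ ⟨hne, hterm⟩
  show compute_schedule nv fs = compute_schedule_alt nv fs
  unfold compute_schedule compute_schedule_alt
  rw [pyGet_last fs hne]
  simp only
  rw [pvForA_eq, pvScanB_eq fs 0 nv (by omega)]
  simp only [List.drop_zero, Nat.zero_add, List.nil_append]
  rw [pvLoopSpec_take]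
  by_cases h6 : 6 < (pvLoopSpec fs nv).2
  · have hk : 0 < fs.getLastD 0 := by
      rcases hterm with hk | hex
      · exact hk
      · exact absurd (pvLoopSpec_le fs nv hex) (by omega)
    rw [pvWhileA_eq _ hk ((pvLoopSpec fs nv).2 - 6).toNat _ _ (le_refl _)]
    simp only [h6, if_pos, pvN]
  · rw [pvWhileA]
    simp [h6]
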